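-- pv_equiv track=rewrite | github.com/Antekov/tasks | cpp/Algo/games/task2/task2.py | isTermyWin
-- ===== SOURCE A (Python) =====
-- n = 8
--
-- def isTermyWin(pos, walls) -> bool:
--     x1 = pos[0] % n
--     y1 = pos[0] // n
--
--     x2 = pos[1] % n
--     y2 = pos[1] // n
--
--     if x1 == x2 and y1 == y2:
--         return True
--
--     if (x1 - x2 == 0 or y1 - y2 == 0 or abs(x1 - x2) == abs(y1 - y2)):
--         # check walls
--         if x1 == x2:
--             for y in range(min(y1, y2) + 1, max(y1, y2)):
--                 if (y, x1) in walls: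
--                     return False
--         elif y1 == y2:
--             for x in range(min(x1, x2) + 1, max(x1, x2)):
--                 if (y1, x) in walls:
--                     return False
--         else:
--             stepx = 1 if x2 > x1 else -1
--             stepy = 1 if y2 > y1 else -1
--             for x, y in zip(range(x1 + stepx, x2, stepx), range(y1 + stepy, y2, stepy)):
--                 if (y, x) in walls:
--                     return False
--
--         return True
--
--     return False
-- ===== SOURCE B (Python) =====
-- # B: instead of walking the intermediate squares and looking each up in walls,
-- # scan the walls list once and test each wall analytically: colinear with the
-- # move (cross product zero) and strictly between the endpoints (dot product
-- # strictly between 0 and |d|^2).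
-- n = 8
--
-- def isTermyWin(pos, walls) -> bool:
--     x1, y1 = pos[0] % n, pos[0] // n
--     x2, y2 = pos[1] % n, pos[1] // n
--     dx, dy = x2 - x1, y2 - y1
--     if dx == 0 and dy == 0:
--         return True
--     if dx != 0 and dy != 0 and abs(dx) != abs(dy):
--         return False
--     d2 = dx * dx + dy * dy
--     for wy, wx in walls:
--         ux, uy = wx - x1, wy - y1
--         if ux * dy == uy * dx and 0 < ux * dx + uy * dy < d2:
--             return False
--     return True
-- ===== Notes on version B (the rewrite author's own statement) =====
-- stated objective: alternative
-- what changed: Instead of enumerating the intermediate squares of the move and looking each one up in walls (A's three range loops), B never walks the path: it makes a single pass over the walls list and tests each wall arithmetically for colinearity with the move (cross product ux*dy == uy*dx) and strict betweenness (0 < dot product < |d|^2).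
import Mathlib
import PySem

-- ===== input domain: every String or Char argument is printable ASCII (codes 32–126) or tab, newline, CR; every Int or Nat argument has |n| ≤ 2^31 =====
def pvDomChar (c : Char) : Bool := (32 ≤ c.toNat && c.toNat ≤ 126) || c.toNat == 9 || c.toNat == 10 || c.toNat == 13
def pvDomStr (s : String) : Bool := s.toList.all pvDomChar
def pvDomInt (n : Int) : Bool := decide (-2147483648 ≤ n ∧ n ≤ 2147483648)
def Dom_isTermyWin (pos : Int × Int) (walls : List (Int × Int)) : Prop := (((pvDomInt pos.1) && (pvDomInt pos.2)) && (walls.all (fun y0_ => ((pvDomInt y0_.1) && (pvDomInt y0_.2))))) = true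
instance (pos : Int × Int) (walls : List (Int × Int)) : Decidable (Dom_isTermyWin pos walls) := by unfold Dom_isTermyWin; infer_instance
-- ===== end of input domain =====

-- B replaces A's walk over intermediate squares (three range loops with a walls lookup per square)
-- by a single pass over the walls list testing each wall arithmetically (cross product = colinear,
-- dot product strictly between 0 and |d|^2 = strictly between the endpoints).


-- ===== PORT A =====
-- literal transliteration of A: three separate wall scans (early-return-False loops ported as .all)
def isTermyWin (pos : Int × Int) (walls : List (Int × Int)) : Bool :=
  let x1 := PySem.Int.mod pos.1 8
  let y1 := PySem.Int.floordiv pos.1 8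
  let x2 := PySem.Int.mod pos.2 8
  let y2 := PySem.Int.floordiv pos.2 8
  if x1 = x2 ∧ y1 = y2 then true
  else if x1 - x2 = 0 ∨ y1 - y2 = 0 ∨ |x1 - x2| = |y1 - y2| then
    if x1 = x2 then
      (PySem.List.pyRange (min y1 y2 + 1) (max y1 y2) 1).all (fun y => !(walls.contains (y, x1)))
    else if y1 = y2 then
      (PySem.List.pyRange (min x1 x2 + 1) (max x1 x2) 1).all (fun x => !(walls.contains (y1, x)))
    else
      let stepx : Int := if x1 < x2 then 1 else -1
      let stepy : Int := if y1 < y2 then 1 else -1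
      ((PySem.List.pyRange (x1 + stepx) x2 stepx).zip (PySem.List.pyRange (y1 + stepy) y2 stepy)).all
        (fun p => !(walls.contains (p.2, p.1)))
  else false

-- ===== PORT B =====
-- literal transliteration of B: one pass over walls, arithmetic colinearity + betweenness test per wall
def isTermyWin_alt (pos : Int × Int) (walls : List (Int × Int)) : Bool :=
  let x1 := PySem.Int.mod pos.1 8
  let y1 := PySem.Int.floordiv pos.1 8
  let x2 := PySem.Int.mod pos.2 8
  let y2 := PySem.Int.floordiv pos.2 8
  let dx := x2 - x1
  let dy := y2 - y1
  if dx = 0 ∧ dy = 0 then true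
  else if dx ≠ 0 ∧ dy ≠ 0 ∧ |dx| ≠ |dy| then false
  else
    let d2 := dx * dx + dy * dy
    walls.all (fun w =>
      !(decide ((w.2 - x1) * dy = (w.1 - y1) * dx ∧
                0 < (w.2 - x1) * dx + (w.1 - y1) * dy ∧
                (w.2 - x1) * dx + (w.1 - y1) * dy < d2)))

-- ===== PRECONDITION & SPEC =====
def Spec_isTermyWin (pos : Int × Int) (walls : List (Int × Int)) (out : Bool) : Prop := out = isTermyWin_alt pos walls
instance (pos : Int × Int) (walls : List (Int × Int)) (out : Bool) : Decidable (Spec_isTermyWin pos walls out) := by unfold Spec_isTermyWin; infer_instance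

-- ===== CLAIM (what is proved, stated in full; the proofs are below) =====
def Claim_equal_isTermyWin : Prop := ∀ (pos : Int × Int) (walls : List (Int × Int)), Dom_isTermyWin pos walls → Spec_isTermyWin pos walls (isTermyWin pos walls)

-- ===== LEMMAS AND PROOFS =====

-- .all over two lists whose elements are in image-bijection agree
theorem pvAllBij {α β γ : Type} (l1 : List α) (l2 : List β) (f : α → γ) (g : β → γ) (p : γ → Bool)
    (h : ∀ y ∈ l1, ∃ i ∈ l2, g i = f y) (h' : ∀ i ∈ l2, ∃ y ∈ l1, f y = g i) :
    l1.all (fun y => p (f y)) = l2.all (fun i => p (g i)) := by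
  rw [Bool.eq_iff_iff]
  simp only [List.all_eq_true]
  constructor
  · intro H i hi; obtain ⟨y, hy, he⟩ := h' i hi; rw [← he]; exact H y hy
  · intro H y hy; obtain ⟨i, hi, he⟩ := h y hy; rw [← he]; exact H i hi

theorem pvZipMapSame {α β γ : Type} (f : α → β) (g : α → γ) (l : List α) :
    (l.map f).zip (l.map g) = l.map (fun x => (f x, g x)) := by
  induction l with
  | nil => rfl
  | cons a t ih => simp [List.zip_cons_cons, ih]

theorem pvVertAsc (x1 y1 y2 : Int) (walls : List (Int × Int)) :
    (PySem.List.pyRange (y1 + 1) y2 1).all (fun y => !(walls.contains (y, x1)))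
    = (PySem.List.pyRange 1 (y2 - y1) 1).all (fun i => !(walls.contains (y1 + i, x1))) := by
  apply pvAllBij (f := fun y => (y, x1)) (g := fun i => (y1 + i, x1)) (p := fun c => !(walls.contains c))
  · intro y hy'
    rw [PySem.List.mem_pyRange_one] at hy'
    exact ⟨y - y1, by rw [PySem.List.mem_pyRange_one]; omega, by rw [show y1 + (y - y1) = y from by omega]⟩
  · intro i hi
    rw [PySem.List.mem_pyRange_one] at hi
    exact ⟨y1 + i, by rw [PySem.List.mem_pyRange_one]; omega, rfl⟩

theorem pvVertDesc (x1 y1 y2 : Int) (walls : List (Int × Int)) :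
    (PySem.List.pyRange (y2 + 1) y1 1).all (fun y => !(walls.contains (y, x1)))
    = (PySem.List.pyRange 1 (y1 - y2) 1).all (fun i => !(walls.contains (y1 + -i, x1))) := by
  apply pvAllBij (f := fun y => (y, x1)) (g := fun i => (y1 + -i, x1)) (p := fun c => !(walls.contains c))
  · intro y hy'
    rw [PySem.List.mem_pyRange_one] at hy'
    exact ⟨y1 - y, by rw [PySem.List.mem_pyRange_one]; omega, by rw [show y1 + -(y1 - y) = y from by omega]⟩
  · intro i hi
    rw [PySem.List.mem_pyRange_one] at hi
    exact ⟨y1 + -i, by rw [PySem.List.mem_pyRange_one]; omega, rfl⟩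

theorem pvHorAsc (x1 y1 x2 : Int) (walls : List (Int × Int)) :
    (PySem.List.pyRange (x1 + 1) x2 1).all (fun x => !(walls.contains (y1, x)))
    = (PySem.List.pyRange 1 (x2 - x1) 1).all (fun i => !(walls.contains (y1, x1 + i))) := by
  apply pvAllBij (f := fun x => (y1, x)) (g := fun i => (y1, x1 + i)) (p := fun c => !(walls.contains c))
  · intro x hx'
    rw [PySem.List.mem_pyRange_one] at hx'
    exact ⟨x - x1, by rw [PySem.List.mem_pyRange_one]; omega, by rw [show x1 + (x - x1) = x from by omega]⟩
  · intro i hi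
    rw [PySem.List.mem_pyRange_one] at hi
    exact ⟨x1 + i, by rw [PySem.List.mem_pyRange_one]; omega, rfl⟩

theorem pvHorDesc (x1 y1 x2 : Int) (walls : List (Int × Int)) :
    (PySem.List.pyRange (x2 + 1) x1 1).all (fun x => !(walls.contains (y1, x)))
    = (PySem.List.pyRange 1 (x1 - x2) 1).all (fun i => !(walls.contains (y1, x1 + -i))) := by
  apply pvAllBij (f := fun x => (y1, x)) (g := fun i => (y1, x1 + -i)) (p := fun c => !(walls.contains c))
  · intro x hx'
    rw [PySem.List.mem_pyRange_one] at hx'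
    exact ⟨x1 - x, by rw [PySem.List.mem_pyRange_one]; omega, by rw [show x1 + -(x1 - x) = x from by omega]⟩
  · intro i hi
    rw [PySem.List.mem_pyRange_one] at hi
    exact ⟨x1 + -i, by rw [PySem.List.mem_pyRange_one]; omega, rfl⟩

theorem pvDiagPP (x1 y1 x2 y2 : Int) (walls : List (Int × Int)) (hd : x2 - x1 = y2 - y1) :
    ((PySem.List.pyRange (x1 + 1) x2 1).zip (PySem.List.pyRange (y1 + 1) y2 1)).all
      (fun p => !(walls.contains (p.2, p.1)))
    = (PySem.List.pyRange 1 (y2 - y1) 1).all (fun i => !(walls.contains (y1 + i, x1 + i))) := by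
  have hn : (y2 - (y1 + 1)).toNat = (x2 - (x1 + 1)).toNat := by omega
  rw [PySem.List.pyRange_one (x1 + 1) x2, PySem.List.pyRange_one (y1 + 1) y2, hn, pvZipMapSame,
    List.all_map]
  simp only [Function.comp_def]
  apply pvAllBij (f := fun k : Nat => (y1 + 1 + (k : Int), x1 + 1 + (k : Int)))
    (g := fun i => (y1 + i, x1 + i)) (p := fun c => !(walls.contains c))
  · intro k hk
    rw [List.mem_range] at hk
    refine ⟨(k : Int) + 1, by rw [PySem.List.mem_pyRange_one]; omega, ?_⟩
    rw [show y1 + ((k : Int) + 1) = y1 + 1 + (k : Int) from by omega,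
      show x1 + ((k : Int) + 1) = x1 + 1 + (k : Int) from by omega]
  · intro i hi
    rw [PySem.List.mem_pyRange_one] at hi
    refine ⟨(i - 1).toNat, by rw [List.mem_range]; omega, ?_⟩
    rw [show y1 + 1 + ((i - 1).toNat : Int) = y1 + i from by omega,
      show x1 + 1 + ((i - 1).toNat : Int) = x1 + i from by omega]

theorem pvDiagPN (x1 y1 x2 y2 : Int) (walls : List (Int × Int)) (hd : x2 - x1 = y1 - y2) :
    ((PySem.List.pyRange (x1 + 1) x2 1).zip (PySem.List.pyRange (y1 - 1) y2 (-1))).all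
      (fun p => !(walls.contains (p.2, p.1)))
    = (PySem.List.pyRange 1 (y1 - y2) 1).all (fun i => !(walls.contains (y1 + -i, x1 + i))) := by
  have hn : (y1 - 1 - y2).toNat = (x2 - (x1 + 1)).toNat := by omega
  rw [PySem.List.pyRange_one (x1 + 1) x2, PySem.List.pyRange_neg_one (y1 - 1) y2, hn, pvZipMapSame,
    List.all_map]
  simp only [Function.comp_def]
  apply pvAllBij (f := fun k : Nat => (y1 - 1 - (k : Int), x1 + 1 + (k : Int)))
    (g := fun i => (y1 + -i, x1 + i)) (p := fun c => !(walls.contains c))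
  · intro k hk
    rw [List.mem_range] at hk
    refine ⟨(k : Int) + 1, by rw [PySem.List.mem_pyRange_one]; omega, ?_⟩
    rw [show y1 + -((k : Int) + 1) = y1 - 1 - (k : Int) from by omega,
      show x1 + ((k : Int) + 1) = x1 + 1 + (k : Int) from by omega]
  · intro i hi
    rw [PySem.List.mem_pyRange_one] at hi
    refine ⟨(i - 1).toNat, by rw [List.mem_range]; omega, ?_⟩
    rw [show y1 - 1 - ((i - 1).toNat : Int) = y1 + -i from by omega,
      show x1 + 1 + ((i - 1).toNat : Int) = x1 + i from by omega]

theorem pvDiagNP (x1 y1 x2 y2 : Int) (walls : List (Int × Int)) (hd : x1 - x2 = y2 - y1) :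
    ((PySem.List.pyRange (x1 - 1) x2 (-1)).zip (PySem.List.pyRange (y1 + 1) y2 1)).all
      (fun p => !(walls.contains (p.2, p.1)))
    = (PySem.List.pyRange 1 (y2 - y1) 1).all (fun i => !(walls.contains (y1 + i, x1 + -i))) := by
  have hn : (y2 - (y1 + 1)).toNat = (x1 - 1 - x2).toNat := by omega
  rw [PySem.List.pyRange_neg_one (x1 - 1) x2, PySem.List.pyRange_one (y1 + 1) y2, hn, pvZipMapSame,
    List.all_map]
  simp only [Function.comp_def]
  apply pvAllBij (f := fun k : Nat => (y1 + 1 + (k : Int), x1 - 1 - (k : Int)))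
    (g := fun i => (y1 + i, x1 + -i)) (p := fun c => !(walls.contains c))
  · intro k hk
    rw [List.mem_range] at hk
    refine ⟨(k : Int) + 1, by rw [PySem.List.mem_pyRange_one]; omega, ?_⟩
    rw [show y1 + ((k : Int) + 1) = y1 + 1 + (k : Int) from by omega,
      show x1 + -((k : Int) + 1) = x1 - 1 - (k : Int) from by omega]
  · intro i hi
    rw [PySem.List.mem_pyRange_one] at hi
    refine ⟨(i - 1).toNat, by rw [List.mem_range]; omega, ?_⟩
    rw [show y1 + 1 + ((i - 1).toNat : Int) = y1 + i from by omega,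
      show x1 - 1 - ((i - 1).toNat : Int) = x1 + -i from by omega]

theorem pvDiagNN (x1 y1 x2 y2 : Int) (walls : List (Int × Int)) (hd : x1 - x2 = y1 - y2) :
    ((PySem.List.pyRange (x1 - 1) x2 (-1)).zip (PySem.List.pyRange (y1 - 1) y2 (-1))).all
      (fun p => !(walls.contains (p.2, p.1)))
    = (PySem.List.pyRange 1 (y1 - y2) 1).all (fun i => !(walls.contains (y1 + -i, x1 + -i))) := by
  have hn : (y1 - 1 - y2).toNat = (x1 - 1 - x2).toNat := by omega
  rw [PySem.List.pyRange_neg_one (x1 - 1) x2, PySem.List.pyRange_neg_one (y1 - 1) y2, hn, pvZipMapSame,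
    List.all_map]
  simp only [Function.comp_def]
  apply pvAllBij (f := fun k : Nat => (y1 - 1 - (k : Int), x1 - 1 - (k : Int)))
    (g := fun i => (y1 + -i, x1 + -i)) (p := fun c => !(walls.contains c))
  · intro k hk
    rw [List.mem_range] at hk
    refine ⟨(k : Int) + 1, by rw [PySem.List.mem_pyRange_one]; omega, ?_⟩
    rw [show y1 + -((k : Int) + 1) = y1 - 1 - (k : Int) from by omega,
      show x1 + -((k : Int) + 1) = x1 - 1 - (k : Int) from by omega]
  · intro i hi
    rw [PySem.List.mem_pyRange_one] at hi
    refine ⟨(i - 1).toNat, by rw [List.mem_range]; omega, ?_⟩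
    rw [show y1 - 1 - ((i - 1).toNat : Int) = y1 + -i from by omega,
      show x1 - 1 - ((i - 1).toNat : Int) = x1 + -i from by omega]

-- A's branch bodies agree with the uniform sign-step walk (proved case by case)
theorem pvBody (x1 y1 x2 y2 : Int) (walls : List (Int × Int)) :
    (if x1 = x2 ∧ y1 = y2 then true
     else if x1 - x2 = 0 ∨ y1 - y2 = 0 ∨ |x1 - x2| = |y1 - y2| then
       if x1 = x2 then
         (PySem.List.pyRange (min y1 y2 + 1) (max y1 y2) 1).all (fun y => !(walls.contains (y, x1)))
       else if y1 = y2 then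
         (PySem.List.pyRange (min x1 x2 + 1) (max x1 x2) 1).all (fun x => !(walls.contains (y1, x)))
       else
         ((PySem.List.pyRange (x1 + (if x1 < x2 then 1 else -1)) x2 (if x1 < x2 then 1 else -1)).zip
          (PySem.List.pyRange (y1 + (if y1 < y2 then 1 else -1)) y2 (if y1 < y2 then 1 else -1))).all
           (fun p => !(walls.contains (p.2, p.1)))
     else false)
    =
    (if x2 - x1 = 0 ∧ y2 - y1 = 0 then true
     else if x2 - x1 ≠ 0 ∧ y2 - y1 ≠ 0 ∧ |x2 - x1| ≠ |y2 - y1| then false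
     else
       (PySem.List.pyRange 1 (max |x2 - x1| |y2 - y1|) 1).all
         (fun i => !(walls.contains
           (y1 + i * ((if 0 < y2 - y1 then (1 : Int) else 0) - (if y2 - y1 < 0 then 1 else 0)),
            x1 + i * ((if 0 < x2 - x1 then (1 : Int) else 0) - (if x2 - x1 < 0 then 1 else 0)))))) := by
  by_cases hB : x1 = x2 ∧ y1 = y2
  · obtain ⟨hx, hy⟩ := hB
    subst hx; subst hy
    rw [if_pos ⟨rfl, rfl⟩, if_pos ⟨by ring, by ring⟩]
  · rw [if_neg hB]
    by_cases hx : x1 = x2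
    · -- vertical
      subst hx
      have hy : y1 ≠ y2 := fun h => hB ⟨rfl, h⟩
      rw [if_pos (Or.inl (sub_self x1)), if_pos rfl,
        if_neg (show ¬(x1 - x1 = 0 ∧ y2 - y1 = 0) by omega),
        if_neg (show ¬(x1 - x1 ≠ 0 ∧ y2 - y1 ≠ 0 ∧ |x1 - x1| ≠ |y2 - y1|) from
          fun h => h.1 (sub_self x1))]
      rw [show |x1 - x1| = 0 from by rw [sub_self, abs_zero],
        max_eq_right (abs_nonneg (y2 - y1)),
        show ((if 0 < x1 - x1 then (1 : Int) else 0) - (if x1 - x1 < 0 then 1 else 0)) = 0 from by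
          rw [if_neg (by omega), if_neg (by omega)]; ring]
      simp only [mul_zero, add_zero]
      by_cases hlt : y1 < y2
      · rw [min_eq_left hlt.le, max_eq_right hlt.le,
          abs_of_pos (show (0 : Int) < y2 - y1 by omega),
          show ((if 0 < y2 - y1 then (1 : Int) else 0) - (if y2 - y1 < 0 then 1 else 0)) = 1 from by
            rw [if_pos (by omega), if_neg (by omega)]; ring]
        simp only [mul_one]
        exact pvVertAsc x1 y1 y2 walls
      · have hgt : y2 < y1 := by omega
        rw [min_eq_right hgt.le, max_eq_left hgt.le,
          abs_of_neg (show y2 - y1 < (0 : Int) by omega),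
          show ((if 0 < y2 - y1 then (1 : Int) else 0) - (if y2 - y1 < 0 then 1 else 0)) = -1 from by
            rw [if_neg (by omega), if_pos (by omega)]; ring,
          show -(y2 - y1) = y1 - y2 from by ring]
        simp only [mul_neg_one]
        exact pvVertDesc x1 y1 y2 walls
    · by_cases hy : y1 = y2
      · -- horizontal
        subst hy
        rw [if_pos (Or.inr (Or.inl (sub_self y1))), if_neg hx, if_pos rfl,
          if_neg (show ¬(x2 - x1 = 0 ∧ y1 - y1 = 0) by omega),
          if_neg (show ¬(x2 - x1 ≠ 0 ∧ y1 - y1 ≠ 0 ∧ |x2 - x1| ≠ |y1 - y1|) from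
            fun h => h.2.1 (sub_self y1))]
        rw [show |y1 - y1| = 0 from by rw [sub_self, abs_zero],
          max_eq_left (abs_nonneg (x2 - x1)),
          show ((if 0 < y1 - y1 then (1 : Int) else 0) - (if y1 - y1 < 0 then 1 else 0)) = 0 from by
            rw [if_neg (by omega), if_neg (by omega)]; ring]
        simp only [mul_zero, add_zero]
        by_cases hlt : x1 < x2
        · rw [min_eq_left hlt.le, max_eq_right hlt.le,
            abs_of_pos (show (0 : Int) < x2 - x1 by omega),
            show ((if 0 < x2 - x1 then (1 : Int) else 0) - (if x2 - x1 < 0 then 1 else 0)) = 1 from by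
              rw [if_pos (by omega), if_neg (by omega)]; ring]
          simp only [mul_one]
          exact pvHorAsc x1 y1 x2 walls
        · have hgt : x2 < x1 := by omega
          rw [min_eq_right hgt.le, max_eq_left hgt.le,
            abs_of_neg (show x2 - x1 < (0 : Int) by omega),
            show ((if 0 < x2 - x1 then (1 : Int) else 0) - (if x2 - x1 < 0 then 1 else 0)) = -1 from by
              rw [if_neg (by omega), if_pos (by omega)]; ring,
            show -(x2 - x1) = x1 - x2 from by ring]
          simp only [mul_neg_one]
          exact pvHorDesc x1 y1 x2 walls
      · by_cases habs : |x1 - x2| = |y1 - y2|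
        · -- diagonal
          rw [if_pos (Or.inr (Or.inr habs)), if_neg hx, if_neg hy,
            if_neg (show ¬(x2 - x1 = 0 ∧ y2 - y1 = 0) by omega),
            if_neg (show ¬(x2 - x1 ≠ 0 ∧ y2 - y1 ≠ 0 ∧ |x2 - x1| ≠ |y2 - y1|) from
              fun h => h.2.2 (by rw [abs_sub_comm x2 x1, abs_sub_comm y2 y1]; exact habs))]
          by_cases hxl : x1 < x2
          · by_cases hyl : y1 < y2
            · have hd : x2 - x1 = y2 - y1 := by
                rw [abs_of_neg (show x1 - x2 < (0 : Int) by omega),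
                  abs_of_neg (show y1 - y2 < (0 : Int) by omega)] at habs
                omega
              rw [if_pos hxl, if_pos hyl,
                show |x2 - x1| = y2 - y1 from by rw [abs_of_pos (by omega : (0:Int) < x2 - x1)]; omega,
                show |y2 - y1| = y2 - y1 from abs_of_pos (by omega),
                max_self,
                show ((if 0 < y2 - y1 then (1 : Int) else 0) - (if y2 - y1 < 0 then 1 else 0)) = 1 from by
                  rw [if_pos (by omega), if_neg (by omega)]; ring,
                show ((if 0 < x2 - x1 then (1 : Int) else 0) - (if x2 - x1 < 0 then 1 else 0)) = 1 from by
                  rw [if_pos (by omega), if_neg (by omega)]; ring]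
              simp only [mul_one]
              exact pvDiagPP x1 y1 x2 y2 walls hd
            · have hyg : y2 < y1 := by omega
              have hd : x2 - x1 = y1 - y2 := by
                rw [abs_of_neg (show x1 - x2 < (0 : Int) by omega),
                  abs_of_pos (show (0 : Int) < y1 - y2 by omega)] at habs
                omega
              rw [if_pos hxl, if_neg hyl,
                show |x2 - x1| = y1 - y2 from by rw [abs_of_pos (by omega : (0:Int) < x2 - x1)]; omega,
                show |y2 - y1| = y1 - y2 from by rw [abs_of_neg (by omega : y2 - y1 < (0:Int))]; ring,
                max_self,
                show ((if 0 < y2 - y1 then (1 : Int) else 0) - (if y2 - y1 < 0 then 1 else 0)) = -1 from by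
                  rw [if_neg (by omega), if_pos (by omega)]; ring,
                show ((if 0 < x2 - x1 then (1 : Int) else 0) - (if x2 - x1 < 0 then 1 else 0)) = 1 from by
                  rw [if_pos (by omega), if_neg (by omega)]; ring]
              simp only [mul_one, mul_neg_one]
              exact pvDiagPN x1 y1 x2 y2 walls hd
          · have hxg : x2 < x1 := by omega
            by_cases hyl : y1 < y2
            · have hd : x1 - x2 = y2 - y1 := by
                rw [abs_of_pos (show (0 : Int) < x1 - x2 by omega),
                  abs_of_neg (show y1 - y2 < (0 : Int) by omega)] at habs
                omega
              rw [if_neg hxl, if_pos hyl,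
                show |x2 - x1| = y2 - y1 from by rw [abs_of_neg (by omega : x2 - x1 < (0:Int))]; omega,
                show |y2 - y1| = y2 - y1 from abs_of_pos (by omega),
                max_self,
                show ((if 0 < y2 - y1 then (1 : Int) else 0) - (if y2 - y1 < 0 then 1 else 0)) = 1 from by
                  rw [if_pos (by omega), if_neg (by omega)]; ring,
                show ((if 0 < x2 - x1 then (1 : Int) else 0) - (if x2 - x1 < 0 then 1 else 0)) = -1 from by
                  rw [if_neg (by omega), if_pos (by omega)]; ring]
              simp only [mul_one, mul_neg_one]
              rw [show x1 + (-1 : Int) = x1 - 1 from by ring]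
              exact pvDiagNP x1 y1 x2 y2 walls hd
            · have hyg : y2 < y1 := by omega
              have hd : x1 - x2 = y1 - y2 := by
                rw [abs_of_pos (show (0 : Int) < x1 - x2 by omega),
                  abs_of_pos (show (0 : Int) < y1 - y2 by omega)] at habs
                omega
              rw [if_neg hxl, if_neg hyl,
                show |x2 - x1| = y1 - y2 from by rw [abs_of_neg (by omega : x2 - x1 < (0:Int))]; omega,
                show |y2 - y1| = y1 - y2 from by rw [abs_of_neg (by omega : y2 - y1 < (0:Int))]; ring,
                max_self,
                show ((if 0 < y2 - y1 then (1 : Int) else 0) - (if y2 - y1 < 0 then 1 else 0)) = -1 from by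
                  rw [if_neg (by omega), if_pos (by omega)]; ring,
                show ((if 0 < x2 - x1 then (1 : Int) else 0) - (if x2 - x1 < 0 then 1 else 0)) = -1 from by
                  rw [if_neg (by omega), if_pos (by omega)]; ring]
              simp only [mul_neg_one]
              rw [show x1 + (-1 : Int) = x1 - 1 from by ring,
                show y1 + (-1 : Int) = y1 - 1 from by ring]
              exact pvDiagNN x1 y1 x2 y2 walls hd
        · -- not aligned
          rw [if_neg (show ¬(x1 - x2 = 0 ∨ y1 - y2 = 0 ∨ |x1 - x2| = |y1 - y2|) from by
              rintro (h | h | h)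
              · exact hx (by omega)
              · exact hy (by omega)
              · exact habs h),
            if_neg (show ¬(x2 - x1 = 0 ∧ y2 - y1 = 0) by omega),
            if_pos (show x2 - x1 ≠ 0 ∧ y2 - y1 ≠ 0 ∧ |x2 - x1| ≠ |y2 - y1| from
              ⟨by omega, by omega,
               fun h => habs (by rw [abs_sub_comm x1 x2, abs_sub_comm y1 y2]; exact h)⟩)]

-- walking an index list and looking cells up in walls  =  scanning walls with a membership predicate
theorem pvAllSwap (idx : List Int) (f : Int → Int × Int) (walls : List (Int × Int))
    (cond : Int × Int → Prop) [DecidablePred cond]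
    (h : ∀ w, cond w ↔ ∃ i ∈ idx, f i = w) :
    idx.all (fun i => !(walls.contains (f i))) = walls.all (fun w => !(decide (cond w))) := by
  rw [Bool.eq_iff_iff]
  simp only [List.all_eq_true, Bool.not_eq_true', decide_eq_false_iff_not,
    List.contains_eq_mem, decide_eq_false_iff_not]
  constructor
  · intro H w hw hc
    obtain ⟨i, hi, he⟩ := (h w).mp hc
    exact H i hi (he ▸ hw)
  · intro H i hi hw
    exact H (f i) hw ((h (f i)).mpr ⟨i, hi, rfl⟩)

-- characterization: a wall passes B's cross/dot test iff it is one of the walk's intermediate cells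
theorem pvCond (x1 y1 dx dy : Int) (hnz : ¬(dx = 0 ∧ dy = 0))
    (hal : dx = 0 ∨ dy = 0 ∨ |dx| = |dy|) (w : Int × Int) :
    ((w.2 - x1) * dy = (w.1 - y1) * dx ∧
      0 < (w.2 - x1) * dx + (w.1 - y1) * dy ∧
      (w.2 - x1) * dx + (w.1 - y1) * dy < dx * dx + dy * dy)
    ↔ ∃ i, (1 ≤ i ∧ i < max |dx| |dy|) ∧
        (y1 + i * ((if 0 < dy then (1:Int) else 0) - (if dy < 0 then 1 else 0)),
         x1 + i * ((if 0 < dx then (1:Int) else 0) - (if dx < 0 then 1 else 0))) = w := by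
  obtain ⟨wy, wx⟩ := w
  simp only [Prod.mk.injEq]
  by_cases hdx0 : dx = 0
  · subst hdx0
    have hdy : dy ≠ 0 := fun h => hnz ⟨rfl, h⟩
    have hsx : ((if 0 < (0:Int) then (1:Int) else 0) - (if (0:Int) < 0 then 1 else 0)) = 0 := by norm_num
    have hm : max |(0:Int)| |dy| = |dy| := by rw [abs_zero]; exact max_eq_right (abs_nonneg dy)
    rw [hsx, hm]
    simp only [mul_zero, zero_mul, zero_add, add_zero]
    by_cases hpos : 0 < dy
    · have hsy : ((if 0 < dy then (1:Int) else 0) - (if dy < 0 then 1 else 0)) = 1 := by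
        rw [if_pos hpos, if_neg (by omega)]; ring
      rw [hsy, abs_of_pos hpos]
      constructor
      · rintro ⟨he, h1, h2⟩
        have hux : wx - x1 = 0 := by
          rcases mul_eq_zero.mp he with h | h
          · exact h
          · exact absurd h hdy
        have huy1 : 0 < wy - y1 := by nlinarith
        have huy2 : wy - y1 < dy := by nlinarith
        exact ⟨wy - y1, ⟨by omega, by omega⟩, by omega, by omega⟩
      · rintro ⟨i, ⟨hi1, hi2⟩, e1, e2⟩
        refine ⟨by rw [show wx - x1 = 0 from by omega]; ring, ?_, ?_⟩
        · have : wy - y1 = i := by omega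
          rw [this]; nlinarith
        · have : wy - y1 = i := by omega
          rw [this]; nlinarith
    · have hneg : dy < 0 := by omega
      have hsy : ((if 0 < dy then (1:Int) else 0) - (if dy < 0 then 1 else 0)) = -1 := by
        rw [if_neg hpos, if_pos hneg]; ring
      rw [hsy, abs_of_neg hneg]
      constructor
      · rintro ⟨he, h1, h2⟩
        have hux : wx - x1 = 0 := by
          rcases mul_eq_zero.mp he with h | h
          · exact h
          · exact absurd h hdy
        have huy1 : wy - y1 < 0 := by nlinarith
        have huy2 : -dy < -(wy - y1) + -dy + -dy ∨ True := Or.inr trivial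
        have huy3 : -(wy - y1) < -dy := by nlinarith
        exact ⟨-(wy - y1), ⟨by omega, by omega⟩, by omega, by omega⟩
      · rintro ⟨i, ⟨hi1, hi2⟩, e1, e2⟩
        refine ⟨by rw [show wx - x1 = 0 from by omega]; ring, ?_, ?_⟩
        · have : wy - y1 = -i := by omega
          rw [this]; nlinarith
        · have : wy - y1 = -i := by omega
          rw [this]; nlinarith
  · by_cases hdy0 : dy = 0
    · subst hdy0
      have hsy : ((if 0 < (0:Int) then (1:Int) else 0) - (if (0:Int) < 0 then 1 else 0)) = 0 := by norm_num
      have hm : max |dx| |(0:Int)| = |dx| := by rw [abs_zero]; exact max_eq_left (abs_nonneg dx)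
      rw [hsy, hm]
      simp only [mul_zero, zero_mul, zero_add, add_zero]
      by_cases hpos : 0 < dx
      · have hsx : ((if 0 < dx then (1:Int) else 0) - (if dx < 0 then 1 else 0)) = 1 := by
          rw [if_pos hpos, if_neg (by omega)]; ring
        rw [hsx, abs_of_pos hpos]
        constructor
        · rintro ⟨he, h1, h2⟩
          have huy : wy - y1 = 0 := by
            rcases mul_eq_zero.mp he.symm with h | h
            · exact h
            · exact absurd h hdx0
          have hux1 : 0 < wx - x1 := by nlinarith
          have hux2 : wx - x1 < dx := by nlinarith
          exact ⟨wx - x1, ⟨by omega, by omega⟩, by omega, by omega⟩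
        · rintro ⟨i, ⟨hi1, hi2⟩, e1, e2⟩
          refine ⟨by rw [show wy - y1 = 0 from by omega]; ring, ?_, ?_⟩
          · have : wx - x1 = i := by omega
            rw [this]; nlinarith
          · have : wx - x1 = i := by omega
            rw [this]; nlinarith
      · have hneg : dx < 0 := by omega
        have hsx : ((if 0 < dx then (1:Int) else 0) - (if dx < 0 then 1 else 0)) = -1 := by
          rw [if_neg hpos, if_pos hneg]; ring
        rw [hsx, abs_of_neg hneg]
        constructor
        · rintro ⟨he, h1, h2⟩
          have huy : wy - y1 = 0 := by
            rcases mul_eq_zero.mp he.symm with h | h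
            · exact h
            · exact absurd h hdx0
          have hux1 : wx - x1 < 0 := by nlinarith
          have hux2 : -(wx - x1) < -dx := by nlinarith
          exact ⟨-(wx - x1), ⟨by omega, by omega⟩, by omega, by omega⟩
        · rintro ⟨i, ⟨hi1, hi2⟩, e1, e2⟩
          refine ⟨by rw [show wy - y1 = 0 from by omega]; ring, ?_, ?_⟩
          · have : wx - x1 = -i := by omega
            rw [this]; nlinarith
          · have : wx - x1 = -i := by omega
            rw [this]; nlinarith
    · -- diagonal
      have habs : |dx| = |dy| := by
        rcases hal with h | h | h
        · exact absurd h hdx0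
        · exact absurd h hdy0
        · exact h
      by_cases hxp : 0 < dx
      · have hsx : ((if 0 < dx then (1:Int) else 0) - (if dx < 0 then 1 else 0)) = 1 := by
          rw [if_pos hxp, if_neg (by omega)]; ring
        by_cases hyp : 0 < dy
        · have hd : dx = dy := by
            rw [abs_of_pos hxp, abs_of_pos hyp] at habs; exact habs
          subst hd
          have hsy := hsx
          rw [hsx, abs_of_pos hxp, max_self]
          simp only [mul_one]
          constructor
          · rintro ⟨he, h1, h2⟩
            have hxy : wx - x1 = wy - y1 := mul_right_cancel₀ hdx0 he
            have h3 : 0 < wx - x1 := by nlinarith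
            have h4 : wx - x1 < dx := by nlinarith
            exact ⟨wx - x1, ⟨by omega, by omega⟩, by omega, by omega⟩
          · rintro ⟨i, ⟨hi1, hi2⟩, e1, e2⟩
            have hx' : wx - x1 = i := by omega
            have hy' : wy - y1 = i := by omega
            rw [hx', hy']
            exact ⟨rfl, by nlinarith, by nlinarith⟩
        · have hyn : dy < 0 := by
            rcases lt_trichotomy dy 0 with h | h | h
            · exact h
            · exact absurd h hdy0
            · exact absurd h hyp
          have hd : dx = -dy := by
            rw [abs_of_pos hxp, abs_of_neg hyn] at habs; exact habs
          have hsy : ((if 0 < dy then (1:Int) else 0) - (if dy < 0 then 1 else 0)) = -1 := by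
            rw [if_neg hyp, if_pos hyn]; ring
          rw [hsx, hsy, abs_of_pos hxp, abs_of_neg hyn,
            show max dx (-dy) = dx from by omega]
          simp only [mul_one, mul_neg_one]
          constructor
          · rintro ⟨he, h1, h2⟩
            have hxy : wx - x1 = -(wy - y1) := by
              have : (wx - x1) * dy = (-(wy - y1)) * dy := by
                linear_combination he + (wy - y1) * hd
              exact mul_right_cancel₀ hdy0 this
            have h3 : 0 < wx - x1 := by nlinarith
            have h4 : wx - x1 < dx := by nlinarith
            exact ⟨wx - x1, ⟨by omega, by omega⟩, by omega, by omega⟩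
          · rintro ⟨i, ⟨hi1, hi2⟩, e1, e2⟩
            have hx' : wx - x1 = i := by omega
            have hy' : wy - y1 = -i := by omega
            rw [hx', hy']
            exact ⟨by ring_nf; nlinarith [hd], by nlinarith, by nlinarith⟩
      · have hxn : dx < 0 := by
          rcases lt_trichotomy dx 0 with h | h | h
          · exact h
          · exact absurd h hdx0
          · exact absurd h hxp
        have hsx : ((if 0 < dx then (1:Int) else 0) - (if dx < 0 then 1 else 0)) = -1 := by
          rw [if_neg hxp, if_pos hxn]; ring
        by_cases hyp : 0 < dy
        · have hd : -dx = dy := by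
            rw [abs_of_neg hxn, abs_of_pos hyp] at habs; exact habs
          have hsy : ((if 0 < dy then (1:Int) else 0) - (if dy < 0 then 1 else 0)) = 1 := by
            rw [if_pos hyp, if_neg (by omega)]; ring
          rw [hsx, hsy, abs_of_neg hxn, abs_of_pos hyp,
            show max (-dx) dy = dy from by omega]
          simp only [mul_one, mul_neg_one]
          constructor
          · rintro ⟨he, h1, h2⟩
            have hxy : wx - x1 = -(wy - y1) := by
              have : (wx - x1) * dy = (-(wy - y1)) * dy := by
                linear_combination he - (wy - y1) * hd
              exact mul_right_cancel₀ hdy0 this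
            have h3 : 0 < wy - y1 := by nlinarith
            have h4 : wy - y1 < dy := by nlinarith
            exact ⟨wy - y1, ⟨by omega, by omega⟩, by omega, by omega⟩
          · rintro ⟨i, ⟨hi1, hi2⟩, e1, e2⟩
            have hx' : wx - x1 = -i := by omega
            have hy' : wy - y1 = i := by omega
            rw [hx', hy']
            exact ⟨by ring_nf; nlinarith [hd], by nlinarith, by nlinarith⟩
        · have hyn : dy < 0 := by
            rcases lt_trichotomy dy 0 with h | h | h
            · exact h
            · exact absurd h hdy0
            · exact absurd h hyp
          have hd : dx = dy := by
            rw [abs_of_neg hxn, abs_of_neg hyn] at habs; omega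
          subst hd
          have hsy := hsx
          rw [hsx, abs_of_neg hxn, max_self]
          simp only [mul_neg_one]
          constructor
          · rintro ⟨he, h1, h2⟩
            have hxy : wx - x1 = wy - y1 := mul_right_cancel₀ hdx0 he
            have h3 : wx - x1 < 0 := by nlinarith
            have h4 : -(wx - x1) < -dx := by nlinarith
            exact ⟨-(wx - x1), ⟨by omega, by omega⟩, by omega, by omega⟩
          · rintro ⟨i, ⟨hi1, hi2⟩, e1, e2⟩
            have hx' : wx - x1 = -i := by omega
            have hy' : wy - y1 = -i := by omega
            rw [hx', hy']
            exact ⟨rfl, by nlinarith, by nlinarith⟩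

-- the uniform walk body equals B's walls-scan body
theorem pvBody2 (x1 y1 x2 y2 : Int) (walls : List (Int × Int)) :
    (if x2 - x1 = 0 ∧ y2 - y1 = 0 then true
     else if x2 - x1 ≠ 0 ∧ y2 - y1 ≠ 0 ∧ |x2 - x1| ≠ |y2 - y1| then false
     else
       (PySem.List.pyRange 1 (max |x2 - x1| |y2 - y1|) 1).all
         (fun i => !(walls.contains
           (y1 + i * ((if 0 < y2 - y1 then (1 : Int) else 0) - (if y2 - y1 < 0 then 1 else 0)),
            x1 + i * ((if 0 < x2 - x1 then (1 : Int) else 0) - (if x2 - x1 < 0 then 1 else 0))))))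
    =
    (if x2 - x1 = 0 ∧ y2 - y1 = 0 then true
     else if x2 - x1 ≠ 0 ∧ y2 - y1 ≠ 0 ∧ |x2 - x1| ≠ |y2 - y1| then false
     else
       walls.all (fun w =>
         !(decide ((w.2 - x1) * (y2 - y1) = (w.1 - y1) * (x2 - x1) ∧
                   0 < (w.2 - x1) * (x2 - x1) + (w.1 - y1) * (y2 - y1) ∧
                   (w.2 - x1) * (x2 - x1) + (w.1 - y1) * (y2 - y1) <
                     (x2 - x1) * (x2 - x1) + (y2 - y1) * (y2 - y1))))) := by
  by_cases h1 : x2 - x1 = 0 ∧ y2 - y1 = 0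
  · rw [if_pos h1, if_pos h1]
  · rw [if_neg h1, if_neg h1]
    by_cases h2 : x2 - x1 ≠ 0 ∧ y2 - y1 ≠ 0 ∧ |x2 - x1| ≠ |y2 - y1|
    · rw [if_pos h2, if_pos h2]
    · rw [if_neg h2, if_neg h2]
      have hal : x2 - x1 = 0 ∨ y2 - y1 = 0 ∨ |x2 - x1| = |y2 - y1| := by
        by_cases hx : x2 - x1 = 0
        · exact Or.inl hx
        · by_cases hy : y2 - y1 = 0
          · exact Or.inr (Or.inl hy)
          · exact Or.inr (Or.inr (by_contra fun hc => h2 ⟨hx, hy, hc⟩))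
      apply pvAllSwap
      intro w
      rw [pvCond x1 y1 (x2 - x1) (y2 - y1) h1 hal w]
      constructor
      · rintro ⟨i, ⟨hi1, hi2⟩, he⟩
        exact ⟨i, by rw [PySem.List.mem_pyRange_one]; exact ⟨hi1, hi2⟩, he⟩
      · rintro ⟨i, hi, he⟩
        rw [PySem.List.mem_pyRange_one] at hi
        exact ⟨i, ⟨hi.1, hi.2⟩, he⟩

-- ===== VERDICT (by name: the statement is the Claim_ definition above) =====
theorem isTermyWin_spec : Claim_equal_isTermyWin := by
  intro pos walls _
  unfold Spec_isTermyWin isTermyWin isTermyWin_alt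
  exact (pvBody _ _ _ _ walls).trans (pvBody2 _ _ _ _ walls)
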